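-- pv_equiv track=rewrite | github.com/CHOIisaac/Algorithm | 프로그래머스/0/181890. 왼쪽 오른쪽/왼쪽 오른쪽.py | solution
-- ===== SOURCE A (Python) =====
-- def solution(str_list):
--     answer = []
--     for i, str in enumerate(str_list):
--         if str == "l":
--             answer = str_list[:i]
--             return answer
--
--         if str == "r":
--             answer = str_list[i+1:]
--             return answer
--     if ["l", "r"] not in str_list:
--         return []
--     return answer
-- ===== SOURCE B (Python) =====
-- def solution(str_list):
--     li = str_list.index('l') if 'l' in str_list else None
--     ri = str_list.index('r') if 'r' in str_list else None
--     if li is None and ri is None: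
--         return []
--     if ri is None or (li is not None and li < ri):
--         return str_list[:li]
--     return str_list[ri+1:]
-- ===== Notes on version B (the rewrite author's own statement) =====
-- stated objective: idiomatic
-- what changed: Replaces the enumerate loop with early returns by an index-first decomposition: find the first positions of 'l' and 'r' with list.index, then pick the slice by comparing the two indices.
import Mathlib
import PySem

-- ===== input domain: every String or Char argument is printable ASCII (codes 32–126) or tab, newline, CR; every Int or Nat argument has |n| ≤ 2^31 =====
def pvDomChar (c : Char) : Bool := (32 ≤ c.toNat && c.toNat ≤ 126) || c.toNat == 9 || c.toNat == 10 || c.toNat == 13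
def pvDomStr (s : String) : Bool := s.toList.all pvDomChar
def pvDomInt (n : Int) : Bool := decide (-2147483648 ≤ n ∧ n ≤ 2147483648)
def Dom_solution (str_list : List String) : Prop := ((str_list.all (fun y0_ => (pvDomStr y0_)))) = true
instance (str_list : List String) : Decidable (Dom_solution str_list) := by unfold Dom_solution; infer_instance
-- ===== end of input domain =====

-- B replaces A's early-return enumerate loop by an index-first decomposition (find both first
-- indices, compare); objective: idiomatic. Both are total; no Pre_ needed.

-- ===== PORT A =====
-- the enumerate loop: `i` is the running index, the second list argument the remaining suffix
def solGo (str_list : List String) : Nat → List String → List String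
  | _, [] =>
    -- Python's `if ["l", "r"] not in str_list`: a list literal is compared against the string
    -- elements, so the membership is always False and the branch returning [] is always taken;
    -- ported exactly as that always-false membership test (answer is still [] here).
    if str_list.any (fun _ => false) then [] else []
  | i, s :: rest =>
    if s == "l" then PySem.List.slice str_list none (some (i : Int))
    else if s == "r" then PySem.List.slice str_list (some ((i : Int) + 1)) none
    else solGo str_list (i + 1) rest

def solution (str_list : List String) : List String :=
  solGo str_list 0 str_list

-- ===== PORT B =====
def solution_alt (str_list : List String) : List String :=
  let li := if str_list.contains "l" then PySem.List.index? str_list "l" else none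
  let ri := if str_list.contains "r" then PySem.List.index? str_list "r" else none
  if li = none ∧ ri = none then []
  else if ri = none ∨ (li ≠ none ∧ li.getD 0 < ri.getD 0) then
    PySem.List.slice str_list none ((li.getD 0 : Int))
  else
    PySem.List.slice str_list (some ((ri.getD 0 : Int) + 1)) none

-- ===== PRECONDITION & SPEC =====
def Spec_solution (str_list : List String) (out : List String) : Prop := out = solution_alt str_list
instance (str_list : List String) (out : List String) : Decidable (Spec_solution str_list out) := by unfold Spec_solution; infer_instance

-- ===== CLAIM (what is proved, stated in full; the proofs are below) =====
def Claim_equal_solution : Prop := ∀ (str_list : List String), Dom_solution str_list → Spec_solution str_list (solution str_list)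

-- ===== LEMMAS AND PROOFS =====

theorem guard_index (xs : List String) (v : String) :
    (if xs.contains v then PySem.List.index? xs v else none) = PySem.List.index? xs v := by
  by_cases h : xs.contains v
  · rw [if_pos h]
  · rw [if_neg h]
    exact ((PySem.List.index?_eq_none_iff xs v).2 (by simpa using h)).symm

-- first index of v in pre ++ v :: suf when v ∉ pre
theorem index?_pre (pre suf : List String) (v : String) (h : v ∉ pre) :
    PySem.List.index? (pre ++ v :: suf) v = some pre.length := by
  rw [PySem.List.index?_eq_some_iff]
  exact ⟨pre, suf, rfl, rfl, h⟩

-- if w occurs in pre ++ s :: suf, w ∉ pre and w ≠ s, its first index exceeds pre.length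
theorem index?_gt (pre suf : List String) (s w : String) (hw : w ∉ pre) (hne : s ≠ w)
    (j : Nat) (hj : PySem.List.index? (pre ++ s :: suf) w = some j) : pre.length < j := by
  obtain ⟨hk, hget, _⟩ := PySem.List.getElem_of_index?_eq_some hj
  by_contra hle
  push Not at hle
  rcases Nat.lt_or_eq_of_le hle with hlt | heq
  · apply hw
    have : (pre ++ s :: suf)[j] = pre[j] := by
      rw [List.getElem_append_left hlt]
    rw [this] at hget
    rw [← hget]; exact List.getElem_mem _
  · apply hne
    have : (pre ++ s :: suf)[j] = s := by
      subst heq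
      simp
    rw [this] at hget
    exact hget

theorem main_lemma (xs : List String) : ∀ (suf pre : List String),
    xs = pre ++ suf → "l" ∉ pre → "r" ∉ pre →
    solGo xs pre.length suf = solution_alt xs := by
  intro suf
  induction suf with
  | nil =>
    intro pre hxs hl hr
    subst hxs
    simp only [List.append_nil] at *
    simp only [solGo, solution_alt, guard_index]
    rw [(PySem.List.index?_eq_none_iff _ _).2 hl, (PySem.List.index?_eq_none_iff _ _).2 hr]
    simp
  | cons s rest ih =>
    intro pre hxs hl hr
    subst hxs
    by_cases hsl : s = "l"
    · subst hsl
      simp only [solution_alt, guard_index]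
      rw [index?_pre pre rest _ hl]
      simp only [solGo, beq_self_eq_true, if_true]
      rcases hri : PySem.List.index? (pre ++ "l" :: rest) "r" with _ | j
      · simp
      · have := index?_gt pre rest "l" "r" hr (by decide) j hri
        simp [this]
    · by_cases hsr : s = "r"
      · subst hsr
        simp only [solution_alt, guard_index]
        rw [index?_pre pre rest _ hr]
        simp only [solGo]
        rcases hli : PySem.List.index? (pre ++ "r" :: rest) "l" with _ | j
        · simp
        · have := index?_gt pre rest "r" "l" hl (by decide) j hli
          simp [show ¬ (j < pre.length) by omega, Option.getD]
      · have step : solGo (pre ++ s :: rest) pre.length (s :: rest)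
            = solGo (pre ++ s :: rest) (pre.length + 1) rest := by
          simp [solGo, hsl, hsr]
        rw [step]
        have hl' : "l" ∉ pre ++ [s] := by
          simp [hl]; intro h; exact hsl h.symm
        have hr' : "r" ∉ pre ++ [s] := by
          simp [hr]; intro h; exact hsr h.symm
        have := ih (pre ++ [s]) (by simp) hl' hr'
        simpa using this

-- ===== VERDICT (by name: the statement is the Claim_ definition above) =====
theorem solution_spec : Claim_equal_solution := by
  intro xs _
  unfold Spec_solution solution
  have := main_lemma xs xs [] rfl (by simp) (by simp)
  simpa using this
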